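-- pv_equiv track=rewrite | github.com/struc2ture/s2lang | s2_old.py | parse_module
-- ===== SOURCE A (Python) =====
-- def parse_module(src):
--     lines = src.splitlines()
--     module_name = None
--     funcs = []
--     imports = []
--     c_includes = []
--
--     for line in lines:
--         if line.startswith("module"):
--             module_name = line.split()[1].rstrip(";")
--         elif line.startswith("import"):
--             imp = line.split()[1].rstrip(";")
--             imports.append(imp)
--         elif line.startswith("#include"):
--             c_includes.append(line.strip())
--         elif line.startswith("int "):
--             header = line.split("{")[0].strip() + ";"
--             body = line
--             funcs.append((header, body))
--     return module_name, funcs, imports, c_includes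
-- ===== SOURCE B (Python) =====
-- def parse_module(src):
--     def leaf(line):
--         if line.startswith("module"):
--             return (line.split()[1].rstrip(";"), [], [], [])
--         if line.startswith("import"):
--             return (None, [], [line.split()[1].rstrip(";")], [])
--         if line.startswith("#include"):
--             return (None, [], [], [line.strip()])
--         if line.startswith("int "):
--             return (None, [(line.split("{")[0].strip() + ";", line)], [], [])
--         return (None, [], [], [])
--
--     def combine(a, b):
--         return (b[0] if b[0] is not None else a[0],
--                 a[1] + b[1], a[2] + b[2], a[3] + b[3])
--
--     def go(lines):
--         if len(lines) == 0:
--             return (None, [], [], [])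
--         if len(lines) == 1:
--             return leaf(lines[0])
--         mid = len(lines) // 2
--         return combine(go(lines[:mid]), go(lines[mid:]))
--
--     return go(src.splitlines())
-- ===== Notes on version B (the rewrite author's own statement) =====
-- stated objective: alternative
-- what changed: Replaces the single classify-and-accumulate loop by a divide-and-conquer: the line list is split in halves, each half is parsed recursively into a summary tuple, and summaries are merged with an associative combine (lists concatenated, rightmost module name wins).
-- outside the precondition, e.g. on parse_module('module'): A raises IndexError, B raises IndexError; on parse_module('import'): A raises IndexError, B raises IndexError
import Mathlib
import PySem

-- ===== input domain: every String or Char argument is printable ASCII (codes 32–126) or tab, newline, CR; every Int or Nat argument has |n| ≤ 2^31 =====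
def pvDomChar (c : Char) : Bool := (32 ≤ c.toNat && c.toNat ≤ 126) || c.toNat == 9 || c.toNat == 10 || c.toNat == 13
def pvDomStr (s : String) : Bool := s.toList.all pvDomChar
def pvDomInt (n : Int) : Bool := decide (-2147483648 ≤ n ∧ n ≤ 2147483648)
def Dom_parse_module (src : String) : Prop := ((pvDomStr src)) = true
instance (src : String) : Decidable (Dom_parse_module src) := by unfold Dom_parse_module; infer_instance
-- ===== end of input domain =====

-- B replaces A's single classify-and-accumulate loop by a divide-and-conquer over the line list
-- (halve, recurse, merge summaries); same results, a genuinely different traversal (objective: alternative).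

-- shared helpers (both Pythons build these exact same intermediate strings)
-- s.rstrip(";"): drop trailing ';' characters; hand-ported, exact (rstrip with an explicit char set)
def pvRstripSemi (s : String) : String :=
  String.ofList ((s.toList.reverse.dropWhile (fun c => c == ';')).reverse)

-- line.split()[1]; Pre_parse_module guarantees the index is in range (Python raises IndexError otherwise)
def pvWord1 (line : String) : String :=
  (PySem.List.pyGet? (PySem.Str.split₀ line) 1).getD ""

-- line.split("{")[0]: split with a nonempty separator always yields a nonempty list, so [0] is its head
def pvHeadBrace (line : String) : String :=
  ((PySem.Str.split? line "{").getD []).headD ""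

-- s + ";" on strings built char-by-char (Lean's String.append is opaque to the kernel)
def pvAddSemi (s : String) : String := String.ofList (s.toList ++ [';'])

-- ===== PORT A =====
def pvStepA (st : Option String × (List (String × String)) × List String × List String)
    (line : String) : Option String × (List (String × String)) × List String × List String :=
  let (m, funcs, imports, cincs) := st
  if PySem.Str.startswith line "module" then
    (some (pvRstripSemi (pvWord1 line)), funcs, imports, cincs)
  else if PySem.Str.startswith line "import" then
    (m, funcs, imports ++ [pvRstripSemi (pvWord1 line)], cincs)
  else if PySem.Str.startswith line "#include" then
    (m, funcs, imports, cincs ++ [PySem.Str.strip line])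
  else if PySem.Str.startswith line "int " then
    (m, funcs ++ [(pvAddSemi (PySem.Str.strip (pvHeadBrace line)), line)], imports, cincs)
  else st

def parse_module (src : String) : Option String × (List (String × String)) × List String × List String :=
  (PySem.Str.splitlines src).foldl pvStepA (none, [], [], [])

-- ===== PORT B =====
-- leaf(line): the summary of a single line
def pvLeafB (line : String) : Option String × (List (String × String)) × List String × List String :=
  if PySem.Str.startswith line "module" then
    (some (pvRstripSemi (pvWord1 line)), [], [], [])
  else if PySem.Str.startswith line "import" then
    (none, [], [pvRstripSemi (pvWord1 line)], [])
  else if PySem.Str.startswith line "#include" then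
    (none, [], [], [PySem.Str.strip line])
  else if PySem.Str.startswith line "int " then
    (none, [(pvAddSemi (PySem.Str.strip (pvHeadBrace line)), line)], [], [])
  else (none, [], [], [])

-- combine(a, b): merge two summaries; rightmost module name wins, lists concatenate
def pvCombineB (a b : Option String × (List (String × String)) × List String × List String) :
    Option String × (List (String × String)) × List String × List String :=
  ((match b.1 with | some x => some x | none => a.1),
   a.2.1 ++ b.2.1, a.2.2.1 ++ b.2.2.1, a.2.2.2 ++ b.2.2.2)

-- go(lines): split in halves, recurse, merge
def pvGoB (ls : List String) : Option String × (List (String × String)) × List String × List String :=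
  if h : ls.length = 0 then (none, [], [], [])
  else if h1 : ls.length = 1 then pvLeafB (ls.headD "")
  else pvCombineB (pvGoB (ls.take (ls.length / 2))) (pvGoB (ls.drop (ls.length / 2)))
termination_by ls.length
decreasing_by
  · simp only [List.length_take]; omega
  · simp only [List.length_drop]; omega

def parse_module_alt (src : String) : Option String × (List (String × String)) × List String × List String :=
  pvGoB (PySem.Str.splitlines src)

-- ===== PRECONDITION & SPEC =====
-- Pre_ excludes exactly the inputs where A (and B) raise IndexError: a line starting with
-- "module" or "import" that has fewer than two whitespace-separated words.
def Pre_parse_module (src : String) : Prop :=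
  ∀ line ∈ PySem.Str.splitlines src,
    (PySem.Str.startswith line "module" = true ∨ PySem.Str.startswith line "import" = true) →
      2 ≤ (PySem.Str.split₀ line).length
instance (src : String) : Decidable (Pre_parse_module src) := by unfold Pre_parse_module; infer_instance

def pvWitness_parse_module : String := "module m;\nimport x;\nint f() { }"

def Spec_parse_module (src : String) (out : Option String × (List (String × String)) × List String × List String) : Prop := out = parse_module_alt src
instance (src : String) (out : Option String × (List (String × String)) × List String × List String) : Decidable (Spec_parse_module src out) := by unfold Spec_parse_module; infer_instance

-- ===== CLAIM (what is proved, stated in full; the proofs are below) =====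
def Claim_equal_parse_module : Prop := ∀ (src : String), Dom_parse_module src → Pre_parse_module src → Spec_parse_module src (parse_module src)

-- ===== LEMMAS AND PROOFS =====

-- the common characterization both ports are proved equal to
def pvSum (ls : List String) : Option String × (List (String × String)) × List String × List String :=
  ( ((ls.filter (fun l => PySem.Str.startswith l "module")).map
      (fun l => pvRstripSemi (pvWord1 l))).getLast?,
    (ls.filter (fun l => PySem.Str.startswith l "int ")).map
      (fun l => (pvAddSemi (PySem.Str.strip (pvHeadBrace l)), l)),
    (ls.filter (fun l => PySem.Str.startswith l "import")).map
      (fun l => pvRstripSemi (pvWord1 l)),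
    (ls.filter (fun l => PySem.Str.startswith l "#include")).map
      (fun l => PySem.Str.strip l) )

-- two incomparable lists cannot both be prefixes of the same line
theorem pv_not_two_prefixes {l : String} {p q : List Char}
    (h : PySem.Chars.startswith l.toList p = true)
    (hpq : ¬ (p <+: q) ∧ ¬ (q <+: p)) :
    PySem.Chars.startswith l.toList q = false := by
  by_contra hq
  rw [Bool.not_eq_false] at hq
  rw [PySem.Chars.startswith_iff] at h hq
  rcases List.prefix_or_prefix_of_prefix h hq with h' | h'
  · exact hpq.1 h'
  · exact hpq.2 h'

-- the "last module line wins" accumulator as an Option.elim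
theorem pv_lastOr_cons (x : String) (xs : List String) (m : Option String) :
    ((x :: xs).getLast?).elim m some = (xs.getLast?).elim (some x) some := by
  cases xs with
  | nil => simp
  | cons y ys =>
    rw [List.getLast?_cons_cons]
    cases h : (y :: ys).getLast? with
    | none => simp [List.getLast?_eq_none_iff] at h
    | some a => simp

-- A's loop invariant: folding pvStepA from any state appends pvSum's per-category lists
theorem pv_loopA (ls : List String) :
    ∀ (m : Option String) (f : List (String × String)) (i c : List String),
    ls.foldl pvStepA (m, f, i, c) =
      ( ((pvSum ls).1).elim m some,
        f ++ (pvSum ls).2.1, i ++ (pvSum ls).2.2.1, c ++ (pvSum ls).2.2.2 ) := by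
  induction ls with
  | nil => intro m f i c; simp [pvSum]
  | cons l ls ih =>
    intro m f i c
    have disj : ∀ (p q : String), ¬ (p.toList <+: q.toList) ∧ ¬ (q.toList <+: p.toList) →
        PySem.Str.startswith l p = true → PySem.Str.startswith l q = false := by
      intro p q hpq h
      have := pv_not_two_prefixes (p := p.toList) (q := q.toList)
        (by simpa [PySem.Str.startswith] using h) hpq
      simpa [PySem.Str.startswith] using this
    simp only [List.foldl_cons, pvStepA, pvSum]
    by_cases h1 : PySem.Str.startswith l "module" = true
    · have h2 := disj "module" "import" (by decide) h1
      have h3 := disj "module" "#include" (by decide) h1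
      have h4 := disj "module" "int " (by decide) h1
      simp at h1 h2 h3 h4
      simp [pvSum, h1, h2, h3, h4, ih, pv_lastOr_cons]
    · by_cases h2 : PySem.Str.startswith l "import" = true
      · have h3 := disj "import" "#include" (by decide) h2
        have h4 := disj "import" "int " (by decide) h2
        simp at h1 h2 h3 h4
        simp [pvSum, h1, h2, h3, h4, ih]
      · by_cases h3 : PySem.Str.startswith l "#include" = true
        · have h4 := disj "#include" "int " (by decide) h3
          simp at h1 h2 h3 h4
          simp [pvSum, h1, h2, h3, h4, ih]
        · by_cases h4 : PySem.Str.startswith l "int " = true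
          · simp at h1 h2 h3 h4
            simp [pvSum, h1, h2, h3, h4, ih]
          · simp at h1 h2 h3 h4
            simp [pvSum, h1, h2, h3, h4, ih]

-- pvSum is a monoid homomorphism for pvCombineB
theorem pv_sum_append (xs ys : List String) :
    pvSum (xs ++ ys) = pvCombineB (pvSum xs) (pvSum ys) := by
  simp only [pvSum, pvCombineB, List.filter_append, List.map_append, List.getLast?_append]
  cases h : ((ys.filter (fun l => PySem.Str.startswith l "module")).map
      (fun l => pvRstripSemi (pvWord1 l))).getLast? <;> simp

-- a single line's summary is its leaf
theorem pv_sum_singleton (l : String) : pvSum [l] = pvLeafB l := by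
  have disj : ∀ (p q : String), ¬ (p.toList <+: q.toList) ∧ ¬ (q.toList <+: p.toList) →
      PySem.Str.startswith l p = true → PySem.Str.startswith l q = false := by
    intro p q hpq h
    have := pv_not_two_prefixes (p := p.toList) (q := q.toList)
      (by simpa [PySem.Str.startswith] using h) hpq
    simpa [PySem.Str.startswith] using this
  simp only [pvSum, pvLeafB]
  by_cases h1 : PySem.Str.startswith l "module" = true
  · have h2 := disj "module" "import" (by decide) h1
    have h3 := disj "module" "#include" (by decide) h1
    have h4 := disj "module" "int " (by decide) h1
    simp at h1 h2 h3 h4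
    simp [h1, h2, h3, h4]
  · by_cases h2 : PySem.Str.startswith l "import" = true
    · have h3 := disj "import" "#include" (by decide) h2
      have h4 := disj "import" "int " (by decide) h2
      simp at h1 h2 h3 h4
      simp [h1, h2, h3, h4]
    · by_cases h3 : PySem.Str.startswith l "#include" = true
      · have h4 := disj "#include" "int " (by decide) h3
        simp at h1 h2 h3 h4
        simp [h1, h2, h3, h4]
      · by_cases h4 : PySem.Str.startswith l "int " = true
        · simp at h1 h2 h3 h4
          simp [h1, h2, h3, h4]
        · simp at h1 h2 h3 h4
          simp [h1, h2, h3, h4]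

-- B's divide-and-conquer computes the same summary
theorem pv_goB_eq (ls : List String) : pvGoB ls = pvSum ls := by
  induction hn : ls.length using Nat.strong_induction_on generalizing ls with
  | _ n ih =>
    rw [pvGoB]
    by_cases h0 : ls.length = 0
    · cases ls with
      | nil => simp [pvSum]
      | cons a t => simp at h0
    · by_cases h1 : ls.length = 1
      · match ls, h1 with
        | [l], _ => simpa using (pv_sum_singleton l).symm
      · simp only [h0, h1, dite_false]
        have hlen : 2 ≤ ls.length := by omega
        have ht : (ls.take (ls.length / 2)).length < n := by
          simp only [List.length_take]; omega
        have hd : (ls.drop (ls.length / 2)).length < n := by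
          simp only [List.length_drop]; omega
        rw [ih _ (hn ▸ ht) _ rfl, ih _ (hn ▸ hd) _ rfl, ← pv_sum_append,
          List.take_append_drop]

-- ===== VERDICT (by name: the statement is the Claim_ definition above) =====
theorem parse_module_spec : Claim_equal_parse_module := by
  intro src _ _
  unfold Spec_parse_module parse_module parse_module_alt
  rw [pv_loopA, pv_goB_eq]
  cases hm : (pvSum (PySem.Str.splitlines src)).1 <;> simp [Prod.ext_iff, hm]
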